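-- pv_equiv track=rewrite | github.com/dgeragh/license-audit | src/license_audit/sources/poetry_lock.py | _matches_selector
-- ===== SOURCE A (Python) =====
-- def _matches_selector(pkg_groups: list[str], selectors: list[str] | None) -> bool:
--     """Return True if the package's groups satisfy the user's selectors."""
--     if selectors is None:
--         return True
--     for selector in selectors:
--         if selector == "main" and "main" in pkg_groups:
--             return True
--         if selector == "dev" and "dev" in pkg_groups:
--             return True
--         if selector.startswith("group:"):
--             group_name = selector[len("group:") :]
--             if group_name in pkg_groups:
--                 return True
--     return False
-- ===== SOURCE B (Python) =====
-- def _matches_selector(pkg_groups: list[str], selectors: list[str] | None) -> bool: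
--     """Return True if the package's groups satisfy the user's selectors."""
--     if selectors is None:
--         return True
--     requested = set(selectors)
--     return any(
--         "group:" + group in requested
--         or (group in ("main", "dev") and group in requested)
--         for group in pkg_groups
--     )
-- ===== Notes on version B (the rewrite author's own statement) =====
-- stated objective: alternative
-- what changed: Inverts the iteration: instead of scanning selectors with early returns and stripping the 'group:' prefix off each to test against pkg_groups, B builds a set of the selectors once and scans pkg_groups, asking for each group whether 'group:'+group (or, for 'main'/'dev', the bare name) is a requested selector.
import Mathlib
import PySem

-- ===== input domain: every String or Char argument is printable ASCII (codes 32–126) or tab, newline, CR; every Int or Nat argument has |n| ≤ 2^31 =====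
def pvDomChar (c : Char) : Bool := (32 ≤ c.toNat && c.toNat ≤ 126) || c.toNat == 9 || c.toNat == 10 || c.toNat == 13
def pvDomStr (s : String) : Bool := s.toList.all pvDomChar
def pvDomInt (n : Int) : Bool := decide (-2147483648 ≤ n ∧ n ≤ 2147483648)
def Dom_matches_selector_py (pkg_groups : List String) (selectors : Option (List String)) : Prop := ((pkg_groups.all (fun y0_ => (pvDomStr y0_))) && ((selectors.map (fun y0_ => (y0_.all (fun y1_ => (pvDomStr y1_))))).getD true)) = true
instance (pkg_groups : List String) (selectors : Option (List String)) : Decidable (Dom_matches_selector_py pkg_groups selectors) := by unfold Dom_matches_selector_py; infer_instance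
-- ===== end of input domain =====

-- B inverts the iteration: instead of scanning selectors and testing each against the group
-- list, it asks for each package group whether the selectors request it (alternative decomposition).

-- ===== PORT A =====
-- the 'for selector in selectors' loop with its early returns
def matchesLoopA (pkg_groups : List String) : List String → Bool
  | [] => false
  | selector :: rest =>
    if selector == "main" && pkg_groups.contains "main" then true
    else if selector == "dev" && pkg_groups.contains "dev" then true
    else if PySem.Str.startswith selector "group:" then
      let group_name := PySem.Str.slice selector (some (6 : Int)) none   -- selector[len("group:") :]
      if pkg_groups.contains group_name then true
      else matchesLoopA pkg_groups rest
    else matchesLoopA pkg_groups rest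

def matches_selector_py (pkg_groups : List String) (selectors : Option (List String)) : Bool :=
  match selectors with
  | none => true
  | some sels => matchesLoopA pkg_groups sels

-- ===== PORT B =====
-- "group:" + group  (Python string concatenation, exact: List Char append under String.ofList)
def groupPrefixed (group : String) : String := String.ofList ("group:".toList ++ group.toList)

def matches_selector_py_alt (pkg_groups : List String) (selectors : Option (List String)) : Bool :=
  match selectors with
  | none => true
  | some sels =>
    let requested := PySem.Set.ofList sels
    pkg_groups.any (fun group =>
      requested.contains (groupPrefixed group) ||
      ((group == "main" || group == "dev") && requested.contains group))

-- ===== PRECONDITION & SPEC =====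
def Spec_matches_selector_py (pkg_groups : List String) (selectors : Option (List String)) (out : Bool) : Prop := out = matches_selector_py_alt pkg_groups selectors
instance (pkg_groups : List String) (selectors : Option (List String)) (out : Bool) : Decidable (Spec_matches_selector_py pkg_groups selectors out) := by unfold Spec_matches_selector_py; infer_instance

-- ===== CLAIM (what is proved, stated in full; the proofs are below) =====
def Claim_equal_matches_selector_py : Prop := ∀ (pkg_groups : List String) (selectors : Option (List String)), Dom_matches_selector_py pkg_groups selectors → Spec_matches_selector_py pkg_groups selectors (matches_selector_py pkg_groups selectors)

-- ===== LEMMAS AND PROOFS =====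

-- string equality through toList
theorem str_beq_toList (a b : String) : (a == b) = (a.toList == b.toList) := by
  by_cases h : a = b
  · subst h; simp
  · have h2 : a.toList ≠ b.toList := fun he => h (String.toList_inj.mp he)
    simp [h, h2]

-- equality against an ofList-built string goes to the list side
theorem ofList_beq (L : List Char) (t : String) : (String.ofList L == t) = (L == t.toList) := by
  by_cases h : L = t.toList
  · subst h; simp [String.ofList_toList]
  · have h2 : String.ofList L ≠ t := fun he => h (by rw [← he]; simp)
    simp [h, h2]

-- selector[6:] on the list side
theorem slice6_toList (s : String) :
    (PySem.Str.slice s (some (6 : Int)) none).toList = s.toList.drop 6 := by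
  have := PySem.List.slice_from (xs := s.toList) (a := (6 : Int)) (by norm_num)
  simp [PySem.Str.slice, this]

-- any distributes over a pointwise disjunction
theorem any_or (f h : String → Bool) (xs : List String) :
    xs.any (fun g => f g || h g) = (xs.any f || xs.any h) := by
  induction xs with
  | nil => rfl
  | cons x l ih =>
    simp only [List.any_cons, ih]
    cases f x <;> cases h x <;> cases l.any f <;> cases l.any h <;> rfl

-- any of an equality test is contains
theorem any_beq (xs : List String) (v : String) :
    xs.any (fun g => g == v) = xs.contains v := by
  induction xs with
  | nil => rfl
  | cons x l ih =>
    by_cases h : x = v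
    · subst h; simp
    · simp [List.any_cons, ih, h, Ne.symm h]

-- congruence for any
theorem any_congr' (f h : String → Bool) (xs : List String) (he : ∀ g, f g = h g) :
    xs.any f = xs.any h := by
  induction xs with
  | nil => rfl
  | cons x l ih => simp [List.any_cons, ih, he]

-- the Bool shuffle used to peel one selector off B's per-group test
theorem bool_shuffle (a b c d e : Bool) :
    ((a || b) || (c && (d || e))) = ((a || c && d) || (b || c && e)) := by
  cases a <;> cases b <;> cases c <;> cases d <;> cases e <;> rfl

-- "group:" + g never equals "main" or "dev"
theorem gp_ne_main (g : String) : (groupPrefixed g == "main") = false := by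
  rw [groupPrefixed, ofList_beq]
  simp

theorem gp_ne_dev (g : String) : (groupPrefixed g == "dev") = false := by
  rw [groupPrefixed, ofList_beq]
  simp

-- one-step unfoldings of A's loop, one per branch shape
theorem loopA_main (pg rest : List String) :
    matchesLoopA pg ("main" :: rest) = (pg.contains "main" || matchesLoopA pg rest) := by
  have hsw : PySem.Chars.startswith ['m','a','i','n'] ['g','r','o','u','p',':'] = false := by decide
  by_cases h : "main" ∈ pg <;> simp [matchesLoopA, h, hsw]

theorem loopA_dev (pg rest : List String) :
    matchesLoopA pg ("dev" :: rest) = (pg.contains "dev" || matchesLoopA pg rest) := by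
  have hsw : PySem.Chars.startswith ['d','e','v'] ['g','r','o','u','p',':'] = false := by decide
  by_cases h : "dev" ∈ pg <;> simp [matchesLoopA, h, hsw]

theorem loopA_group (pg : List String) (s : String) (rest : List String)
    (hm : (s == "main") = false) (hd : (s == "dev") = false)
    (hg : PySem.Str.startswith s "group:" = true) :
    matchesLoopA pg (s :: rest)
      = (pg.contains (PySem.Str.slice s (some (6 : Int)) none) || matchesLoopA pg rest) := by
  have hg' : PySem.Chars.startswith s.toList ['g','r','o','u','p',':'] = true := by simpa using hg
  by_cases h : PySem.Str.slice s (some (6 : Int)) none ∈ pg <;>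
    simp [matchesLoopA, hm, hd, hg', h]

theorem loopA_other (pg : List String) (s : String) (rest : List String)
    (hm : (s == "main") = false) (hd : (s == "dev") = false)
    (hg : PySem.Str.startswith s "group:" = false) :
    matchesLoopA pg (s :: rest) = matchesLoopA pg rest := by
  have hg' : PySem.Chars.startswith s.toList ['g','r','o','u','p',':'] = false := by simpa using hg
  simp [matchesLoopA, hm, hd, hg']

-- B's per-group test with the head selector peeled off
theorem predB_cons (s : String) (rest : List String) (g : String) :
    (((s :: rest).contains (groupPrefixed g)) ||
      ((g == "main" || g == "dev") && (s :: rest).contains g))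
    = (((groupPrefixed g == s) || ((g == "main" || g == "dev") && (g == s))) ||
       ((rest.contains (groupPrefixed g)) ||
        ((g == "main" || g == "dev") && rest.contains g))) := by
  rw [List.contains_cons, List.contains_cons]
  exact bool_shuffle _ _ _ _ _

-- core equivalence: A's early-return selector scan equals B's group scan
theorem loop_eq_any (pg : List String) : ∀ sels : List String,
    matchesLoopA pg sels
      = pg.any (fun g => sels.contains (groupPrefixed g) ||
          ((g == "main" || g == "dev") && sels.contains g)) := by
  intro sels
  induction sels with
  | nil => simp [matchesLoopA]
  | cons s rest ih =>
    have step : pg.any (fun g => (s :: rest).contains (groupPrefixed g) ||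
          ((g == "main" || g == "dev") && (s :: rest).contains g))
        = (pg.any (fun g => (groupPrefixed g == s) ||
            ((g == "main" || g == "dev") && (g == s))) ||
           pg.any (fun g => rest.contains (groupPrefixed g) ||
            ((g == "main" || g == "dev") && rest.contains g))) := by
      rw [any_congr' _ _ pg (fun g => predB_cons s rest g)]
      exact any_or _ _ pg
    rw [step, ← ih]
    by_cases hm : s = "main"
    · subst hm
      rw [loopA_main]
      congr 1
      rw [any_congr' _ (fun g => g == "main") pg ?_, any_beq]
      intro g
      rw [gp_ne_main g]
      by_cases h : g = "main"
      · subst h; rfl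
      · have h' : (g == "main") = false := beq_eq_false_iff_ne.mpr h
        simp [h']
    · have hm' : (s == "main") = false := beq_eq_false_iff_ne.mpr hm
      by_cases hd : s = "dev"
      · subst hd
        rw [loopA_dev]
        congr 1
        rw [any_congr' _ (fun g => g == "dev") pg ?_, any_beq]
        intro g
        rw [gp_ne_dev g]
        by_cases h : g = "dev"
        · subst h; rfl
        · have h' : (g == "dev") = false := beq_eq_false_iff_ne.mpr h
          simp [h']
      · have hd' : (s == "dev") = false := beq_eq_false_iff_ne.mpr hd
        cases hg : PySem.Str.startswith s "group:" with
        | true =>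
          -- s = "group:" ++ t for t = s.toList.drop 6
          have hg' : ('g' :: 'r' :: 'o' :: 'u' :: 'p' :: ':' :: []) <+: s.toList := by
            have := (PySem.Chars.startswith_iff (s := s.toList)
              (p := ['g','r','o','u','p',':'])).mp (by simpa using hg)
            simpa using this
          obtain ⟨t, ht⟩ := hg'
          rw [loopA_group pg s rest hm' hd' hg]
          congr 1
          rw [any_congr' _ (fun g => g == PySem.Str.slice s (some (6:Int)) none) pg ?_, any_beq]
          intro g
          have hgl : "group:".toList = ['g','r','o','u','p',':'] := by decide
          have hbeq : (groupPrefixed g == s) = (g == PySem.Str.slice s (some (6:Int)) none) := by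
            rw [groupPrefixed, ofList_beq, str_beq_toList, slice6_toList, ← ht, hgl]
            have hdrop : (List.drop 6 (['g','r','o','u','p',':'] ++ t)) = t := rfl
            rw [hdrop]
            simp
          have hno : ((g == "main" || g == "dev") && (g == s)) = false := by
            by_cases h : g = s
            · subst h; simp [hm', hd']
            · simp [beq_eq_false_iff_ne.mpr h]
          rw [hbeq, hno, Bool.or_false]
        | false =>
          rw [loopA_other pg s rest hm' hd' hg]
          have hz : pg.any (fun g => (groupPrefixed g == s) ||
              ((g == "main" || g == "dev") && (g == s))) = false := by
            rw [any_congr' _ (fun _ => false) pg ?_]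
            · simp
            intro g
            have h1 : (groupPrefixed g == s) = false := by
              apply beq_eq_false_iff_ne.mpr
              intro he
              have hsw : PySem.Str.startswith s "group:" = true := by
                rw [← he]
                have : PySem.Chars.startswith ("group:".toList ++ g.toList) "group:".toList
                    = true :=
                  (PySem.Chars.startswith_iff _ _).mpr ⟨g.toList, rfl⟩
                simpa [groupPrefixed, PySem.Str.startswith] using this
              rw [hg] at hsw; exact Bool.false_ne_true hsw
            have h2 : ((g == "main" || g == "dev") && (g == s)) = false := by
              by_cases h : g = s
              · subst h; simp [hm', hd']
              · simp [beq_eq_false_iff_ne.mpr h]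
            rw [h1, h2, Bool.false_or]
          rw [hz, Bool.false_or]

-- membership in set(selectors) is membership in the selector list
theorem contains_ofList (sels : List String) (x : String) :
    (PySem.Set.ofList sels).contains x = sels.contains x := by
  simp [PySem.Set.mem_ofList]

-- ===== VERDICT (by name: the statement is the Claim_ definition above) =====
theorem matches_selector_py_spec : Claim_equal_matches_selector_py := by
  intro pkg_groups selectors _
  unfold Spec_matches_selector_py matches_selector_py matches_selector_py_alt
  cases selectors with
  | none => rfl
  | some sels =>
    show matchesLoopA pkg_groups sels = _
    rw [loop_eq_any pkg_groups sels]
    exact any_congr' _ _ pkg_groups (fun g => by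
      rw [contains_ofList, contains_ofList])
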